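-- pv_equiv track=rewrite | github.com/zanghaoxuan/Reentrancy-Vunerability-Detect-Script-for-VScode | funs.py | split_function
-- ===== SOURCE A (Python) =====
-- def split_function(contract): #输入文件名，分割函数
--     function_list = []
--     lines = contract.split('\n')
--     flag = -1  # 作为记号
--     for line in lines:
--         text = line.strip()
--         if len(text) > 0 and text != "\n":
--             if text.split()[0] == "function":
--                 function_list.append([text])
--                 flag += 1
--             elif len(function_list) > 0 and ("function" in function_list[flag][0]):
--                 function_list[flag].append(text)
--     return function_list
-- ===== SOURCE B (Python) =====
-- def split_function(contract):
--     meaningful = [t for line in contract.split('\n') if (t := line.strip())]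
--     starts = [i for i, t in enumerate(meaningful) if t.split()[0] == "function"]
--     return [meaningful[s:e] for s, e in zip(starts, starts[1:] + [len(meaningful)])]
-- ===== Notes on version B (the rewrite author's own statement) =====
-- stated objective: alternative
-- what changed: A's single pass with a growing block list and a running flag index is replaced by a two-phase decomposition: first build the filtered list of non-empty stripped lines, then collect the indices of the lines whose first token opens a block, and emit one slice of the filtered list per consecutive pair of start indices.
import Mathlib
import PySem

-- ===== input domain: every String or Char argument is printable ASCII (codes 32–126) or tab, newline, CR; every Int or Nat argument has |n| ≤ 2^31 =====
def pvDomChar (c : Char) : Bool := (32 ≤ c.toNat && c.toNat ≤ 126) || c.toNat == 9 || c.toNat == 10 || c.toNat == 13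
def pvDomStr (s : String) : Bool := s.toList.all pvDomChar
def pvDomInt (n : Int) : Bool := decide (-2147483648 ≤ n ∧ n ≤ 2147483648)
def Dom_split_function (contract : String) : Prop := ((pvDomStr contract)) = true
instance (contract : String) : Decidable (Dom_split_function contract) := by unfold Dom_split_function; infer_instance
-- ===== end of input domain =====

-- B replaces A's single-pass fold (running block list + flag index) by a two-phase index-then-slice
-- decomposition: filter the stripped non-empty lines, list the indices of the header lines that
-- open a block, and slice between consecutive indices; objective: alternative (same cost, different structure).

-- ===== PORT A =====
-- shared one-liner for Python's `text.split()[0] == "function"`; split() of the non-empty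
-- stripped text reaching it is never empty, so `headD ""` for `[0]` is exact there
def pvFnStart (t : String) : Bool := (PySem.Str.split₀ t).headD "" == "function"

-- `function_list[flag].append(text)`: write-back at Python index `flag`
-- (exact for every index this program reaches: flag = len(function_list) - 1 ≥ 0)
def pvAppendAt (fl : List (List String)) (i : Int) (x : String) : List (List String) :=
  let j := if i < 0 then ((fl.length : Int) + i).toNat else i.toNat
  fl.set j (((PySem.List.pyGet? fl i).getD []) ++ [x])

def split_function (contract : String) : List (List String) :=
  let lines := (PySem.Str.split? contract "\n").getD []   -- separator "\n" ≠ "", so split? is `some`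
  (lines.foldl (fun st line =>
      let text := PySem.Str.strip line
      if PySem.Str.len text > 0 && text != "\n" then
        if pvFnStart text then
          (st.1 ++ [[text]], st.2 + 1)
        else if decide (0 < st.1.length) && PySem.Str.isIn "function" (((PySem.List.pyGet? st.1 st.2).getD []).headD "") then
          -- `function_list[flag][0]`: in range whenever this branch runs, so getD/headD are exact
          (pvAppendAt st.1 st.2 text, st.2)
        else st
      else st)
    (([] : List (List String)), (-1 : Int))).1

-- ===== PORT B =====
def split_function_alt (contract : String) : List (List String) :=
  let meaningful := (((PySem.Str.split? contract "\n").getD []).map PySem.Str.strip).filter (fun t => t != "")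
  let starts := (PySem.List.enumerate meaningful).filterMap (fun p => if pvFnStart p.2 then some p.1 else none)
  (starts.zip (starts.drop 1 ++ [(meaningful.length : Int)])).map (fun p => PySem.List.slice meaningful (some p.1) (some p.2))

-- ===== PRECONDITION & SPEC =====
def Spec_split_function (contract : String) (out : List (List String)) : Prop := out = split_function_alt contract
instance (contract : String) (out : List (List String)) : Decidable (Spec_split_function contract out) := by unfold Spec_split_function; infer_instance

-- ===== CLAIM (what is proved, stated in full; the proofs are below) =====
def Claim_equal_split_function : Prop := ∀ (contract : String), Dom_split_function contract → Spec_split_function contract (split_function contract)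

-- ===== LEMMAS AND PROOFS =====

-- the list of non-empty stripped lines both programs effectively work on
def pvMean (c : String) : List String :=
  (((PySem.Str.split? c "\n").getD []).map PySem.Str.strip).filter (fun t => t != "")

-- A's loop body after the blank-line guard has fired
def pvStep (st : List (List String) × Int) (t : String) : List (List String) × Int :=
  if pvFnStart t then (st.1 ++ [[t]], st.2 + 1)
  else if decide (0 < st.1.length) && PySem.Str.isIn "function" (((PySem.List.pyGet? st.1 st.2).getD []).headD "") then
    (pvAppendAt st.1 st.2 t, st.2)
  else st

-- reference grouping both sides are reduced to
def pvBlocks : List String → List (List String)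
  | [] => []
  | t :: ts =>
    if pvFnStart t then
      (t :: ts.takeWhile (fun u => !pvFnStart u)) :: pvBlocks (ts.dropWhile (fun u => !pvFnStart u))
    else pvBlocks ts
termination_by l => l.length
decreasing_by
  · exact Nat.lt_succ_of_le (List.length_dropWhile_le _ ts)
  · simp

-- ---- generic string facts ----

lemma pvStrip_ne_newline (l : String) : PySem.Str.strip l ≠ "\n" := by
  intro hequ
  have hcs : PySem.Chars.strip l.toList = ['\n'] := by
    have h0 := congrArg String.toList hequ
    rw [PySem.Str.toList_strip] at h0
    simpa using h0
  have hdw : List.dropWhile PySem.Chars.isspace (PySem.Chars.lstrip l.toList).reverse = ['\n'] := by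
    have h1 : PySem.Chars.rstrip (PySem.Chars.lstrip l.toList) = ['\n'] := hcs
    unfold PySem.Chars.rstrip at h1
    rw [List.reverse_eq_iff] at h1
    simpa using h1
  have hne : List.dropWhile PySem.Chars.isspace (PySem.Chars.lstrip l.toList).reverse ≠ [] := by
    simp [hdw]
  have hhead := List.head_dropWhile_not PySem.Chars.isspace hne
  have hv : (List.dropWhile PySem.Chars.isspace (PySem.Chars.lstrip l.toList).reverse).head hne = '\n' := by
    have h5 := List.head?_eq_some_head hne
    have h6 : (List.dropWhile PySem.Chars.isspace (PySem.Chars.lstrip l.toList).reverse).head? = some '\n' := by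
      rw [hdw]
      rfl
    exact Option.some.inj (h5.symm.trans h6)
  rw [hv] at hhead
  exact absurd hhead (by decide)

lemma pvGoAcc (s : List Char) : ∀ (cur : List Char) (acc : List (List Char)),
    PySem.Chars.split₀.go s cur acc = acc.reverse ++ PySem.Chars.split₀.go s cur [] := by
  induction s with
  | nil =>
    intro cur acc
    by_cases hc : cur.isEmpty
    · simp [PySem.Chars.split₀.go, hc]
    · simp [PySem.Chars.split₀.go, hc]
  | cons c rest ih =>
    intro cur acc
    by_cases hsp : PySem.Chars.isspace c
    · by_cases hc : cur.isEmpty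
      · simp only [PySem.Chars.split₀.go, hsp, hc, if_pos]
        exact ih [] acc
      · simp only [PySem.Chars.split₀.go, hsp, hc, if_true, Bool.false_eq_true, if_false]
        rw [ih [] (cur.reverse :: acc), ih [] [cur.reverse]]
        simp
    · simp only [PySem.Chars.split₀.go, hsp, Bool.false_eq_true, if_false]
      exact ih (c :: cur) acc
lemma pvGoFirstInfix (s : List Char) : ∀ (cur w : List Char),
    (PySem.Chars.split₀.go s cur []).headD [] = w → w ≠ [] → w <:+: (cur.reverse ++ s) := by
  induction s with
  | nil =>
    intro cur w hw hne
    by_cases hc : cur.isEmpty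
    · simp [PySem.Chars.split₀.go, hc] at hw
      first
      | exact absurd hw.symm hne
      | exact absurd hw hne
    · simp [PySem.Chars.split₀.go, hc] at hw
      exact hw ▸ List.IsPrefix.isInfix (by simp)
  | cons c rest ih =>
    intro cur w hw hne
    by_cases hsp : PySem.Chars.isspace c
    · by_cases hc : cur.isEmpty
      · have hcur : cur = [] := by simpa [List.isEmpty_iff] using hc
        subst hcur
        simp only [PySem.Chars.split₀.go, hsp, if_pos, List.isEmpty_nil] at hw
        have h9 := ih [] w (by simpa using hw) hne
        simp only [List.reverse_nil, List.nil_append] at h9 ⊢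
        exact h9.trans (List.suffix_cons c rest).isInfix
      · simp only [PySem.Chars.split₀.go, hsp, hc, if_true, Bool.false_eq_true, if_false] at hw
        rw [pvGoAcc] at hw
        simp at hw
        exact hw ▸ List.IsPrefix.isInfix ⟨c :: rest, by simp⟩
    · simp only [PySem.Chars.split₀.go, hsp, Bool.false_eq_true, if_false] at hw
      have h9 := ih (c :: cur) w hw hne
      simpa using h9
lemma pvFnStart_isIn (t : String) (h : pvFnStart t = true) :
    PySem.Str.isIn "function" t = true := by
  unfold pvFnStart at h
  rw [beq_iff_eq] at h
  rw [PySem.Str.isIn_iff_infix]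
  unfold PySem.Str.split₀ at h
  rcases hsp : PySem.Chars.split₀ t.toList with _ | ⟨w, ws⟩
  · rw [hsp] at h
    simp at h
  · rw [hsp] at h
    simp only [List.map_cons, List.headD_cons] at h
    have hw : w = "function".toList := by
      have h8 := congrArg String.toList h
      simpa using h8
    have hh : (PySem.Chars.split₀.go t.toList [] []).headD [] = w := by
      have h6 : PySem.Chars.split₀ t.toList = PySem.Chars.split₀.go t.toList [] [] := rfl
      rw [← h6, hsp]
      simp
    have h5 := pvGoFirstInfix t.toList [] w hh (by rw [hw]; decide)
    rw [hw] at h5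
    simpa using h5
-- ---- A's fold over raw lines = pvStep-fold over the meaningful lines ----

lemma pvFold_filter (l : List String) (st : List (List String) × Int) :
    l.foldl (fun st line =>
      if PySem.Str.len (PySem.Str.strip line) > 0 && PySem.Str.strip line != "\n" then
        pvStep st (PySem.Str.strip line) else st) st
    = ((l.map PySem.Str.strip).filter (fun t => t != "")).foldl pvStep st := by
  induction l generalizing st with
  | nil => simp only [List.foldl_nil, List.map_nil, List.filter_nil]
  | cons a l ih =>
    simp only [List.foldl_cons, List.map_cons, List.filter_cons]
    by_cases he : PySem.Str.strip a = ""
    · have hg : (PySem.Str.len (PySem.Str.strip a) > 0 && PySem.Str.strip a != "\n") = false := by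
        simp [he, PySem.Str.len]
      rw [hg, if_neg Bool.false_ne_true, he]
      rw [show (("" : String) != "") = false from rfl, if_neg Bool.false_ne_true]
      exact ih st
    · have hlist : (PySem.Str.strip a).toList ≠ [] := by
        intro hnil
        apply he
        have h7 := congrArg String.ofList hnil
        rwa [String.ofList_toList] at h7
      have hlen : 0 < (PySem.Str.strip a).toList.length := List.length_pos_of_ne_nil hlist
      have hg : (PySem.Str.len (PySem.Str.strip a) > 0 && PySem.Str.strip a != "\n") = true := by
        have h2 : (PySem.Str.strip a != "\n") = true := by
          simpa using pvStrip_ne_newline a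
        have h3 : (0:Int) < PySem.Str.len (PySem.Str.strip a) := by
          unfold PySem.Str.len
          exact Int.natCast_pos.mpr hlen
        simp only [gt_iff_lt, decide_eq_true h3, h2, Bool.and_self]
      have hf : (PySem.Str.strip a != "") = true := by simpa using he
      rw [hg]
      rw [if_pos rfl]
      rw [hf]
      rw [if_pos rfl]
      rw [List.foldl_cons]
      exact ih (pvStep st (PySem.Str.strip a))
-- ---- A's pvStep-fold computes pvBlocks ----

lemma pvGet_last (fl : List (List String)) (h : fl ≠ []) :
    PySem.List.pyGet? fl ((fl.length : Int) - 1) = some (fl.getLast h) := by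
  have hn : 0 < fl.length := List.length_pos_of_ne_nil h
  have h1 : (0:Int) ≤ (fl.length : Int) - 1 := by omega
  have h2 : (fl.length : Int) - 1 < (fl.length : Int) := by omega
  have h3 : ((fl.length : Int) - 1).toNat = fl.length - 1 := by omega
  simp only [PySem.List.pyGet?, PySem.List.pyIdx?, if_pos h1, if_pos h2, Option.bind_some, h3]
  rw [List.getLast_eq_getElem h, List.getElem?_eq_getElem (by omega)]

lemma pvAppendAt_last (fl : List (List String)) (h : fl ≠ []) (x : String) :
    pvAppendAt fl ((fl.length : Int) - 1) x = fl.dropLast ++ [fl.getLast h ++ [x]] := by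
  have hn : 0 < fl.length := List.length_pos_of_ne_nil h
  unfold pvAppendAt
  rw [pvGet_last fl h]
  have hneg : ¬ ((fl.length : Int) - 1 < 0) := by omega
  simp only [if_neg hneg, Option.getD_some]
  have h3 : ((fl.length : Int) - 1).toNat = fl.length - 1 := by omega
  rw [h3, List.set_eq_take_append_cons_drop, if_pos (by omega)]
  have h4 : fl.length - 1 + 1 = fl.length := by omega
  rw [h4, List.drop_length, List.dropLast_eq_take]


lemma pvDropLast_cons {α : Type} (l : List α) (h : l ≠ []) (rest : List α) :
    l.dropLast ++ (l.getLast h :: rest) = l ++ rest := by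
  conv_rhs => rw [← List.dropLast_append_getLast h]
  simp

lemma pvFoldA_nonempty (ts : List String) : ∀ (fl : List (List String)) (h : fl ≠ [])
    (hd : String) (tl : List String), fl.getLast h = hd :: tl →
    PySem.Str.isIn "function" hd = true →
    (ts.foldl pvStep (fl, (fl.length : Int) - 1)).1
      = fl.dropLast ++ ((fl.getLast h ++ ts.takeWhile (fun u => !pvFnStart u))
          :: pvBlocks (ts.dropWhile (fun u => !pvFnStart u))) := by
  induction ts with
  | nil =>
    intro fl h hd tl hlast hfn
    simp only [List.foldl_nil, List.takeWhile_nil, List.dropWhile_nil, pvBlocks, List.append_nil]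
    exact (List.dropLast_append_getLast h).symm
  | cons t ts ih =>
    intro fl h hd tl hlast hfn
    simp only [List.foldl_cons]
    by_cases hstart : pvFnStart t = true
    · have hflag : (fl.length : Int) - 1 + 1 = ((fl ++ [[t]]).length : Int) - 1 := by
        simp
      have hstep : pvStep (fl, (fl.length : Int) - 1) t = (fl ++ [[t]], ((fl ++ [[t]]).length : Int) - 1) := by
        unfold pvStep
        simp only [hstart, if_true, hflag]
      rw [hstep]
      have hne' : fl ++ [[t]] ≠ [] := by simp
      have hlast' : (fl ++ [[t]]).getLast hne' = t :: [] := List.getLast_concat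
      rw [ih (fl ++ [[t]]) hne' t [] hlast' (pvFnStart_isIn t hstart)]
      rw [List.takeWhile_cons_of_neg (by simp [hstart]), List.dropWhile_cons_of_neg (by simp [hstart])]
      rw [List.dropLast_concat, hlast']
      rw [pvBlocks]
      simp only [hstart, if_true, List.append_nil]
      rw [pvDropLast_cons fl h]
      simp
    · have hn : 0 < fl.length := List.length_pos_of_ne_nil h
      have hguard : (decide (0 < fl.length) &&
          PySem.Str.isIn "function" (((PySem.List.pyGet? fl ((fl.length : Int) - 1)).getD []).headD "")) = true := by
        rw [pvGet_last fl h, Option.getD_some, hlast]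
        simp only [List.headD_cons, hfn, Bool.and_true]
        exact decide_eq_true hn
      have hlen' : (fl.dropLast ++ [fl.getLast h ++ [t]]).length = fl.length := by
        simp [List.length_dropLast]
        omega
      have hstep : pvStep (fl, (fl.length : Int) - 1) t
          = (fl.dropLast ++ [fl.getLast h ++ [t]], ((fl.dropLast ++ [fl.getLast h ++ [t]]).length : Int) - 1) := by
        unfold pvStep
        simp only [hstart, Bool.false_eq_true, if_false, hguard, if_true]
        rw [pvAppendAt_last fl h t, hlen']
      rw [hstep]
      have hne' : fl.dropLast ++ [fl.getLast h ++ [t]] ≠ [] := by simp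
      have hlast' : (fl.dropLast ++ [fl.getLast h ++ [t]]).getLast hne' = hd :: (tl ++ [t]) := by
        rw [List.getLast_concat, hlast]
        simp
      rw [ih _ hne' hd (tl ++ [t]) hlast' hfn]
      rw [List.dropLast_concat, List.getLast_concat]
      rw [List.takeWhile_cons_of_pos (by simp [hstart]), List.dropWhile_cons_of_pos (by simp [hstart])]
      simp

lemma pvFoldA_nil (ts : List String) :
    (ts.foldl pvStep (([] : List (List String)), (-1 : Int))).1 = pvBlocks ts := by
  induction ts with
  | nil => simp [pvBlocks]
  | cons t ts ih =>
    simp only [List.foldl_cons]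
    by_cases hstart : pvFnStart t = true
    · have hstep : pvStep (([] : List (List String)), (-1 : Int)) t
          = ([[t]], (([[t]] : List (List String)).length : Int) - 1) := by
        unfold pvStep
        simp [hstart]
      rw [hstep]
      rw [pvFoldA_nonempty ts [[t]] (by simp) t [] rfl (pvFnStart_isIn t hstart)]
      rw [pvBlocks]
      simp [hstart]
    · have hstep : pvStep (([] : List (List String)), (-1 : Int)) t = ([], -1) := by
        unfold pvStep
        simp [hstart]
      rw [hstep, ih, pvBlocks]
      simp [hstart]

-- ---- B's index-then-slice computes pvBlocks ----

-- start indices of a line list (B's `starts` of pvMean)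
def pvS (ms : List String) : List Int :=
  (PySem.List.enumerate ms).filterMap (fun p => if pvFnStart p.2 then some p.1 else none)

def pvSliceBody (ms : List String) : List (List String) :=
  ((pvS ms).zip ((pvS ms).drop 1 ++ [(ms.length : Int)])).map
    (fun p => PySem.List.slice ms (some p.1) (some p.2))

lemma pvS_shift (ts : List String) : ∀ (k : Int),
    (PySem.List.enumerate ts (k + 1)).filterMap (fun p => if pvFnStart p.2 then some p.1 else none)
    = ((PySem.List.enumerate ts k).filterMap (fun p => if pvFnStart p.2 then some p.1 else none)).map (· + 1) := by
  induction ts with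
  | nil => intro k; simp [PySem.List.enumerate]
  | cons u us ih =>
    intro k
    rw [PySem.List.enumerate_cons, PySem.List.enumerate_cons]
    by_cases hu : pvFnStart u = true
    · simp only [List.filterMap_cons, hu, if_true, ih (k + 1), List.map_cons]
    · simp only [List.filterMap_cons, hu, Bool.false_eq_true, if_false, ih (k + 1)]

lemma pvS_cons (t : String) (ts : List String) :
    pvS (t :: ts) = (if pvFnStart t then [(0 : Int)] else []) ++ (pvS ts).map (· + 1) := by
  unfold pvS
  rw [PySem.List.enumerate_cons, List.filterMap_cons]
  have hs := pvS_shift ts 0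
  by_cases ht : pvFnStart t = true
  · simp only [ht, if_true, hs, List.singleton_append]
  · simp only [ht, Bool.false_eq_true, if_false, hs, List.nil_append]

lemma pvS_bounds (ms : List String) : ∀ i ∈ pvS ms, 0 ≤ i ∧ i < (ms.length : Int) := by
  induction ms with
  | nil => intro i hi; simp [pvS, PySem.List.enumerate] at hi
  | cons u us ih =>
    intro i hi
    rw [pvS_cons] at hi
    rcases List.mem_append.1 hi with h1 | h1
    · by_cases hu : pvFnStart u = true
      · simp only [hu, if_true, List.mem_singleton] at h1
        subst h1
        refine ⟨le_refl 0, ?_⟩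
        simp only [List.length_cons]
        push_cast
        omega
      · simp [hu] at h1
    · rcases List.mem_map.1 h1 with ⟨j, hj, hj1⟩
      have hjb := ih j hj
      subst hj1
      refine ⟨by omega, ?_⟩
      simp only [List.length_cons]
      push_cast
      omega

lemma pvTakeWhile_eq_take (ts : List String) :
    ts.takeWhile (fun u => !pvFnStart u) = ts.take ((pvS ts).headD (ts.length : Int)).toNat := by
  induction ts with
  | nil => simp
  | cons u us ih =>
    rw [pvS_cons]
    by_cases hu : pvFnStart u = true
    · simp [hu]
    · simp only [hu, Bool.false_eq_true, if_false, List.nil_append]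
      rw [List.takeWhile_cons_of_pos (by simp [hu])]
      rcases hS : pvS us with _ | ⟨i, S'⟩
      · simp only [List.map_nil, List.headD_nil]
        have : ((((u :: us).length : Nat) : Int)).toNat = us.length + 1 := by simp
        rw [this, List.take_succ_cons]
        rw [ih, hS]
        simp
      · have hi : 0 ≤ i := (pvS_bounds us i (by rw [hS]; simp)).1
        simp only [List.map_cons, List.headD_cons]
        have : (i + 1).toNat = i.toNat + 1 := by omega
        rw [this, List.take_succ_cons, ih, hS]
        simp

lemma pvSlice_eval (ms : List String) (i j : Int) (hi : 0 ≤ i) (hj : 0 ≤ j) :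
    PySem.List.slice ms (some i) (some j)
      = (ms.drop (min i.toNat ms.length)).take (min j.toNat ms.length - min i.toNat ms.length) := by
  simp only [PySem.List.slice, PySem.List.clampIdx, if_neg (by omega : ¬ i < 0),
    if_neg (by omega : ¬ j < 0)]

lemma pvSlice_succ (t : String) (ts : List String) (i j : Int) (hi : 0 ≤ i) (hj : 0 ≤ j) :
    PySem.List.slice (t :: ts) (some (i + 1)) (some (j + 1)) = PySem.List.slice ts (some i) (some j) := by
  rw [pvSlice_eval _ _ _ (by omega) (by omega), pvSlice_eval _ _ _ hi hj]
  have h1 : (i + 1).toNat = i.toNat + 1 := by omega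
  have h2 : (j + 1).toNat = j.toNat + 1 := by omega
  rw [h1, h2]
  have h3 : min (i.toNat + 1) (t :: ts).length = min i.toNat ts.length + 1 := by
    simp only [List.length_cons]
    omega
  have h4 : min (j.toNat + 1) (t :: ts).length = min j.toNat ts.length + 1 := by
    simp only [List.length_cons]
    omega
  rw [h3, h4, List.drop_succ_cons]
  congr 1
  omega

lemma pvBlocks_dropWhile (ts : List String) :
    pvBlocks (ts.dropWhile (fun u => !pvFnStart u)) = pvBlocks ts := by
  induction ts with
  | nil => rfl
  | cons u us ih =>
    by_cases hu : pvFnStart u = true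
    · rw [List.dropWhile_cons_of_neg (by simp [hu])]
    · rw [List.dropWhile_cons_of_pos (by simp [hu]), ih, pvBlocks]
      simp [hu]

lemma pvShift (t : String) (ts : List String) :
    (((pvS ts).map (· + 1)).zip (((pvS ts).map (· + 1)).drop 1 ++ [((ts.length : Int) + 1)])).map
      (fun p => PySem.List.slice (t :: ts) (some p.1) (some p.2)) = pvSliceBody ts := by
  unfold pvSliceBody
  rw [← List.map_drop, ← List.map_singleton (f := (· + (1:Int))), ← List.map_append, List.zip_map]
  rw [List.map_map]
  apply List.map_congr_left
  intro p hp
  rcases p with ⟨i, j⟩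
  have hm := List.of_mem_zip hp
  have hi : 0 ≤ i := (pvS_bounds ts i hm.1).1
  have hj : 0 ≤ j := by
    rcases List.mem_append.1 hm.2 with h1 | h1
    · exact (pvS_bounds ts j (List.mem_of_mem_drop h1)).1
    · simp at h1; omega
  simpa using pvSlice_succ t ts i j hi hj

lemma pvSliceBody_eq_blocks (n : Nat) : ∀ ms : List String, ms.length ≤ n → pvSliceBody ms = pvBlocks ms := by
  induction n with
  | zero =>
    intro ms hms
    have : ms = [] := List.eq_nil_of_length_eq_zero (by omega)
    subst this
    simp [pvSliceBody, pvS, PySem.List.enumerate, pvBlocks]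
  | succ n ih =>
    intro ms hms
    rcases ms with _ | ⟨t, ts⟩
    · simp [pvSliceBody, pvS, PySem.List.enumerate, pvBlocks]
    · have hlen : ts.length ≤ n := by simpa using hms
      by_cases hstart : pvFnStart t = true
      · -- pvS (t::ts) = 0 :: map (+1) (pvS ts)
        have hS : pvS (t :: ts) = 0 :: (pvS ts).map (· + 1) := by
          rw [pvS_cons]; simp [hstart]
        rw [pvBlocks]
        simp only [hstart, if_true]
        rcases hSts : pvS ts with _ | ⟨i, S'⟩
        · -- no further start: single block to the end
          unfold pvSliceBody
          rw [hS, hSts]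
          simp only [List.map_nil, List.drop_succ_cons, List.drop_nil, List.nil_append,
            List.zip_cons_cons, List.zip_nil_right, List.map_cons, List.map_nil]
          have hall : ∀ x ∈ ts, (fun u => !pvFnStart u) x = true := by
            have h7 := pvTakeWhile_eq_take ts
            rw [hSts] at h7
            simp at h7
            intro x hx
            simp [h7 x hx]
          rw [List.takeWhile_eq_self_iff.2 hall, List.dropWhile_eq_nil_iff.2 hall]
          rw [pvSlice_eval _ _ _ (by omega) (by omega)]
          simp [pvBlocks]
        · have hi0 : 0 ≤ i := (pvS_bounds ts i (by rw [hSts]; simp)).1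
          have hilt : i < (ts.length : Int) := (pvS_bounds ts i (by rw [hSts]; simp)).2
          have hshift := pvShift t ts
          rw [hSts] at hshift
          simp only [List.map_cons, List.drop_succ_cons, List.drop_zero] at hshift
          unfold pvSliceBody
          rw [hS, hSts]
          simp only [List.map_cons, List.drop_succ_cons, List.drop_zero, List.length_cons,
            Nat.cast_succ, List.cons_append, List.zip_cons_cons, List.map_cons]
          rw [hshift, ih ts hlen, pvBlocks_dropWhile]
          congr 1
          rw [pvSlice_eval _ _ _ le_rfl (by omega)]
          have h1 : min ((0:Int)).toNat (t :: ts).length = 0 := by simp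
          have h2 : (i + 1).toNat = i.toNat + 1 := by omega
          have h3 : min (i.toNat + 1) (t :: ts).length = i.toNat + 1 := by
            simp only [List.length_cons]
            omega
          rw [h1, h2, h3, List.drop_zero, Nat.sub_zero, List.take_succ_cons]
          rw [pvTakeWhile_eq_take ts, hSts]
          simp
      · have hS : pvS (t :: ts) = (pvS ts).map (· + 1) := by
          rw [pvS_cons]; simp [hstart]
        have hblocks : pvBlocks (t :: ts) = pvBlocks ts := by
          rw [pvBlocks]; simp [hstart]
        rw [hblocks, ← ih ts hlen]
        unfold pvSliceBody
        rw [hS]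
        have hlen2 : (((t :: ts).length : Nat) : Int) = (ts.length : Int) + 1 := by simp
        rw [hlen2]
        exact pvShift t ts

-- ===== VERDICT (by name: the statement is the Claim_ definition above) =====
theorem split_function_spec : Claim_equal_split_function := by
  intro contract _
  show split_function contract = split_function_alt contract
  have h1 : split_function contract = ((pvMean contract).foldl pvStep ([], -1)).1 := by
    show (((PySem.Str.split? contract "\n").getD []).foldl
        (fun st line =>
          if PySem.Str.len (PySem.Str.strip line) > 0 && PySem.Str.strip line != "\n" then
            pvStep st (PySem.Str.strip line) else st)
        ([], -1)).1 = _
    rw [pvFold_filter]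
    rfl
  have h2 : split_function_alt contract = pvSliceBody (pvMean contract) := rfl
  rw [h1, h2, pvFoldA_nil, pvSliceBody_eq_blocks (pvMean contract).length _ le_rfl]
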